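-- pv_equiv track=rewrite | github.com/Abhinav-Rajput/Leet_Code | 2128-reverse-prefix-of-word/2128-reverse-prefix-of-word.py | reversePrefix
-- ===== SOURCE A (Python) =====
-- def reversePrefix(word: str, ch: str) -> str:
--
--     res = list(word)
--     l =0
--
--     for i in range(len(word)):
--         if res[i]==ch:
--             while l <=i:
--                 res[i],res[l]=res[l],res[i]
--                 l+=1
--                 i-=1
--             return "".join(res)
--     return word
-- ===== SOURCE B (Python) =====
-- def reversePrefix(word: str, ch: str) -> str:
--     i = next((j for j, c in enumerate(word) if c == ch), None)
--     if i is None: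
--         return word
--     return word[:i+1][::-1] + word[i+1:]
-- ===== Notes on version B (the rewrite author's own statement) =====
-- stated objective: simpler
-- what changed: Replaces A's index loop with an in-place two-pointer swap reversal by a single enumerate scan for the first matching index followed by slice reversal and concatenation.
import Mathlib
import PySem

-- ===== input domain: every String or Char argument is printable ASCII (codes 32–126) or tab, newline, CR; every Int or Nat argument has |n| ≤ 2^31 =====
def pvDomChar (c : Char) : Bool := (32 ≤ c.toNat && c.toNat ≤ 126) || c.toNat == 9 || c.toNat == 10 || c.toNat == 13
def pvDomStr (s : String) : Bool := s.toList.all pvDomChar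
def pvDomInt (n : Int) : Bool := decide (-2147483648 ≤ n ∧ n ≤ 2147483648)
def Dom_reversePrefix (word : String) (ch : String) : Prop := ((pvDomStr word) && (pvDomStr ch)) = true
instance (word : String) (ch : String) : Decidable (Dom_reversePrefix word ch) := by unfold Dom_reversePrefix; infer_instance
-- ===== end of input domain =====

-- B replaces A's in-place two-pointer swap loop with a find-first-matching-index scan followed by slice reversal and concatenation (objective: simpler).

-- ===== PORT A =====
-- the inner 'while l <= i: res[i],res[l] = res[l],res[i]; l += 1; i -= 1' swap loop
def pvSwapA (res : List Char) (l i : Int) : List Char :=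
  if _h : l ≤ i then
    pvSwapA ((res.set i.toNat ((PySem.List.pyGet? res l).getD ' ')).set l.toNat
               ((PySem.List.pyGet? res i).getD ' ')) (l + 1) (i - 1)
  else res
termination_by (i - l + 1).toNat
decreasing_by omega

-- the outer 'for i in range(len(word))' loop; res[i]==ch compares the one-char string res[i] to ch
def pvLoopA (word : String) (ch : String) (res : List Char) (idxs : List Nat) : String :=
  match idxs with
  | [] => word
  | i :: rest =>
      if String.ofList [res.getD i ' '] == ch then String.ofList (pvSwapA res 0 (i : Int))
      else pvLoopA word ch res rest

def reversePrefix (word : String) (ch : String) : String :=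
  let res := word.toList
  pvLoopA word ch res (List.range res.length)

-- ===== PORT B =====
-- first index j with word[j] == ch (per-character one-char-string comparison), Source B's enumerate scan
def pvFindB (cs : List Char) (ch : String) (j : Nat) : Option Nat :=
  match cs with
  | [] => none
  | c :: rest => if String.ofList [c] == ch then some j else pvFindB rest ch (j + 1)

-- word[:i+1][::-1] + word[i+1:] on the code-point list (nonnegative in-range slice = take/drop)
def reversePrefix_alt (word : String) (ch : String) : String :=
  match pvFindB word.toList ch 0 with
  | none => word
  | some i => String.ofList ((word.toList.take (i + 1)).reverse ++ word.toList.drop (i + 1))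

-- ===== PRECONDITION & SPEC =====
def Spec_reversePrefix (word : String) (ch : String) (out : String) : Prop := out = reversePrefix_alt word ch
instance (word : String) (ch : String) (out : String) : Decidable (Spec_reversePrefix word ch out) := by unfold Spec_reversePrefix; infer_instance

-- ===== CLAIM (what is proved, stated in full; the proofs are below) =====
def Claim_equal_reversePrefix : Prop := ∀ (word : String) (ch : String), Dom_reversePrefix word ch → Spec_reversePrefix word ch (reversePrefix word ch)

-- ===== LEMMAS AND PROOFS =====

-- per-index characterisation of the swap loop: inside [l, i] the segment is mirrored, outside it is untouched
theorem pvSwapA_getElem? (res : List Char) (l i : Int)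
    (hl : 0 ≤ l) (hli : l ≤ i + 2) (hlen : i < (res.length : Int)) (j : Nat) :
    (pvSwapA res l i)[j]? = if l ≤ (j : Int) ∧ (j : Int) ≤ i then res[(l + i - j).toNat]? else res[j]? := by
  fun_induction pvSwapA with
  | case2 res l i h =>
      have : ¬ (l ≤ (j:Int) ∧ (j:Int) ≤ i) := by omega
      simp [this]
  | case1 res l i h ih =>
      have hh : l ≤ i := h
      have hlN : l.toNat < res.length := by omega
      have hiN : i.toNat < res.length := by omega
      have a1 : 0 ≤ l + 1 := by omega
      have a2 : l + 1 ≤ i - 1 + 2 := by omega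
      have a3 : i - 1 < ((((res.set i.toNat ((PySem.List.pyGet? res l).getD ' ')).set l.toNat
          ((PySem.List.pyGet? res i).getD ' ')).length : Nat) : Int) := by
        rw [List.length_set, List.length_set]; omega
      replace ih := ih a1 a2 a3
      have hgl : PySem.List.pyGet? res l = some res[l.toNat] :=
        PySem.List.pyGet?_eq_some_getElem res hl (by omega)
      have hgi : PySem.List.pyGet? res i = some res[i.toNat] :=
        PySem.List.pyGet?_eq_some_getElem res (by omega) (by omega)
      rw [hgl, hgi] at ih ⊢
      simp only [Option.getD_some] at ih ⊢
      rw [ih]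
      by_cases hj1 : l ≤ (j:Int) ∧ (j:Int) ≤ i
      · rw [if_pos hj1]
        by_cases hj2 : l + 1 ≤ (j:Int) ∧ (j:Int) ≤ i - 1
        · rw [if_pos hj2]
          have hk : (l + 1 + (i - 1) - (j:Int)).toNat = (l + i - (j:Int)).toNat := by omega
          rw [hk, List.getElem?_set, List.getElem?_set]
          have h1 : ¬ (l.toNat = (l + i - (j:Int)).toNat) := by omega
          have h2 : ¬ (i.toNat = (l + i - (j:Int)).toNat) := by omega
          rw [if_neg h1, if_neg h2]
        · rw [if_neg hj2]
          rcases (by omega : (j:Int) = l ∨ (j:Int) = i) with hjl | hji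
          · have hjn : j = l.toNat := by omega
            have hk : (l + i - (j:Int)).toNat = i.toNat := by omega
            subst hjn
            rw [hk, List.getElem?_set, if_pos rfl, List.length_set, if_pos hlN,
                List.getElem?_eq_getElem hiN]
          · have hjn : j = i.toNat := by omega
            have hk : (l + i - (j:Int)).toNat = l.toNat := by omega
            subst hjn
            rw [hk]
            by_cases he : l.toNat = i.toNat
            · rw [List.getElem?_set, if_pos he, List.length_set, if_pos (he ▸ hlN),
                  List.getElem?_eq_getElem hlN]
              simp [he]
            · rw [List.getElem?_set, if_neg he, List.getElem?_set, if_pos rfl, if_pos hiN,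
                  List.getElem?_eq_getElem hlN]
      · rw [if_neg hj1]
        have hj2 : ¬ (l + 1 ≤ (j:Int) ∧ (j:Int) ≤ i - 1) := by omega
        rw [if_neg hj2, List.getElem?_set, List.getElem?_set]
        have h1 : ¬ (l.toNat = j) := by omega
        have h2 : ¬ (i.toNat = j) := by omega
        rw [if_neg h1, if_neg h2]

-- the swap loop from 0 to i reverses the prefix of length i+1
theorem pvSwapA_zero (res : List Char) (i : Nat) (h : i < res.length) :
    pvSwapA res 0 ((i : Nat) : Int) = (res.take (i + 1)).reverse ++ res.drop (i + 1) := by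
  apply List.ext_getElem?
  intro j
  rw [pvSwapA_getElem? res 0 ((i : Nat) : Int) (by omega) (by omega) (by omega) j]
  have hrevlen : ((res.take (i + 1)).reverse).length = i + 1 := by
    rw [List.length_reverse, List.length_take]; omega
  by_cases hj : j ≤ i
  · rw [if_pos (by omega)]
    rw [List.getElem?_append_left (by omega), List.getElem?_reverse (by rw [List.length_take]; omega),
        List.length_take, List.getElem?_take]
    have h1 : min (i + 1) res.length - 1 - j < i + 1 := by omega
    rw [if_pos h1]
    congr 1
    omega
  · rw [if_neg (by omega)]
    rw [List.getElem?_append_right (by omega), List.getElem?_drop]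
    congr 1
    omega

-- a successful scan returns an index within the scanned range
theorem pvFindB_bounds (ch : String) : ∀ (t : List Char) (k i : Nat),
    pvFindB t ch k = some i → k ≤ i ∧ i < k + t.length := by
  intro t
  induction t with
  | nil => intro k i hf; simp [pvFindB] at hf
  | cons c t' ihp =>
      intro k i hf
      rw [pvFindB] at hf
      by_cases hc : (String.ofList [c] == ch) = true
      · rw [if_pos hc] at hf
        obtain rfl : k = i := by simpa using hf
        exact ⟨le_rfl, by simp⟩
      · rw [if_neg hc] at hf
        have := ihp (k + 1) i hf
        constructor <;> [omega; (simp; omega)]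

-- A's outer loop finds the same first matching index as B's scan
theorem loop_eq_find (word ch : String) (res : List Char) : ∀ (t : List Char) (k : Nat),
    res.drop k = t → k + t.length = res.length →
    pvLoopA word ch res (List.range' k t.length) =
      (match pvFindB t ch k with
       | none => word
       | some i => String.ofList (pvSwapA res 0 (i : Int))) := by
  intro t
  induction t with
  | nil => intro k _ _; simp [pvLoopA, pvFindB]
  | cons c t' ihp =>
      intro k hd hk
      have hget : res[k]? = some c := by
        have h0 := congrArg (fun l => l[0]?) hd
        simpa [List.getElem?_drop] using h0
      have hgetD : res.getD k ' ' = c := by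
        rw [List.getD_eq_getElem?_getD, hget]; rfl
      rw [List.length_cons, List.range'_succ, pvLoopA, hgetD, pvFindB]
      by_cases hc : (String.ofList [c] == ch) = true
      · rw [if_pos hc, if_pos hc]
      · rw [if_neg hc, if_neg hc]
        apply ihp (k + 1)
        · have h1 := congrArg (List.drop 1) hd
          simpa [List.drop_drop] using h1
        · simp at hk ⊢; omega

theorem main_eq (word ch : String) : reversePrefix word ch = reversePrefix_alt word ch := by
  unfold reversePrefix reversePrefix_alt
  simp only [List.range_eq_range']
  have h := loop_eq_find word ch word.toList word.toList 0 (by simp) (by simp)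
  rw [h]
  cases hf : pvFindB word.toList ch 0 with
  | none => rfl
  | some i =>
      have hb := pvFindB_bounds ch word.toList 0 i hf
      simp only [pvSwapA_zero word.toList i (by omega)]

-- ===== VERDICT (by name: the statement is the Claim_ definition above) =====
theorem reversePrefix_spec : Claim_equal_reversePrefix := by
  intro word ch _
  unfold Spec_reversePrefix
  exact main_eq word ch
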